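-- pv_equiv track=rewrite | github.com/vascoalramos/ai | lab_01/part_2.py | remove_e_conta
-- ===== SOURCE A (Python) =====
-- def remove_e_conta(lst, element):
--     if lst == []:
--         return [], 0
--
--     lst1, count = remove_e_conta(lst[1:], element)
--     if lst[0] == element:
--         return lst1, count + 1
--     else:
--         return [lst[0]] + lst1, count
-- ===== SOURCE B (Python) =====
-- def remove_e_conta(lst, element):
--     result = []
--     count = 0
--     for x in lst:
--         if x == element:
--             count += 1
--         else:
--             result.append(x)
--     return result, count
-- ===== Notes on version B (the rewrite author's own statement) =====
-- stated objective: faster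
-- what changed: Replaces A's head/tail recursion with list-concatenation ([x] + rest, O(n^2) copying and O(n) recursion depth) by a single forward loop with an accumulator list and counter.
import Mathlib
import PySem

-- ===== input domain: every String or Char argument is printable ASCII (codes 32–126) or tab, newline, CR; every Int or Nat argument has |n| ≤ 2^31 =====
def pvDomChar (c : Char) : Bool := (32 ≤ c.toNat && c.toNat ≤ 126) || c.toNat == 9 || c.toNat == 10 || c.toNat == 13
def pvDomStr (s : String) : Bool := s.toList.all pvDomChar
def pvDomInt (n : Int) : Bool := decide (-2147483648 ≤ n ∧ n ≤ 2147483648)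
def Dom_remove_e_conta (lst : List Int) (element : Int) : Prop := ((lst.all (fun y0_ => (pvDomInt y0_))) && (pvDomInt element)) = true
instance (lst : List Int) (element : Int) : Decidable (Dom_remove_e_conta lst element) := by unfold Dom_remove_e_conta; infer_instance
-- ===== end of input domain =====

-- ===== PORT A =====
-- literal port of A: structural recursion on the list, prepending via [x] ++ rest
def remove_e_conta (lst : List Int) (element : Int) : List Int × Int :=
  match lst with
  | [] => ([], 0)
  | x :: rest =>
    let p := remove_e_conta rest element
    if x == element then (p.1, p.2 + 1) else ([x] ++ p.1, p.2)

-- ===== PORT B =====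
-- port of B: forward loop with accumulator (result, count)
def remove_e_conta_alt (lst : List Int) (element : Int) : List Int × Int :=
  lst.foldl (fun acc x => if x == element then (acc.1, acc.2 + 1) else (acc.1 ++ [x], acc.2)) ([], 0)

-- ===== PRECONDITION & SPEC =====
def Spec_remove_e_conta (lst : List Int) (element : Int) (out : List Int × Int) : Prop := out = remove_e_conta_alt lst element
instance (lst : List Int) (element : Int) (out : List Int × Int) : Decidable (Spec_remove_e_conta lst element out) := by unfold Spec_remove_e_conta; infer_instance

-- ===== CLAIM (what is proved, stated in full; the proofs are below) =====
def Claim_equal_remove_e_conta : Prop := ∀ (lst : List Int) (element : Int), Dom_remove_e_conta lst element → Spec_remove_e_conta lst element (remove_e_conta lst element)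

-- ===== LEMMAS AND PROOFS =====

lemma alt_fold (lst : List Int) (element : Int) (res : List Int) (cnt : Int) :
    lst.foldl (fun acc x => if x == element then (acc.1, acc.2 + 1) else (acc.1 ++ [x], acc.2)) (res, cnt)
      = (res ++ (remove_e_conta lst element).1, cnt + (remove_e_conta lst element).2) := by
  induction lst generalizing res cnt with
  | nil => simp [remove_e_conta]
  | cons x rest ih =>
    simp only [List.foldl_cons, remove_e_conta]
    by_cases h : x == element
    · simp only [h, ite_true, ih, Prod.mk.injEq]
      exact ⟨trivial, by ring⟩
    · simp only [h, Bool.false_eq_true, ite_false, ih, List.append_assoc]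

-- ===== VERDICT (by name: the statement is the Claim_ definition above) =====
theorem remove_e_conta_spec : Claim_equal_remove_e_conta := by
  intro lst element _
  unfold Spec_remove_e_conta remove_e_conta_alt
  rw [alt_fold]
  simp
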